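-- pv_equiv track=rewrite | github.com/nikdimentiy/mint | CodeWars/number_of_clans.py | solution
-- ===== SOURCE A (Python) =====
-- def solution(divisors, k):
--     """
--     Calculate the number of clans formed by integers from 1 to k based on their divisibility by a given set of divisors.
--
--     Two integers A and B are considered friends if each integer from the array 'divisors' is either a divisor of both A and B or neither A nor B.
--     If two integers are friends, they belong to the same clan.
--
--     Parameters:
--     divisors (list of int): A list of integers that are used as divisors to determine friendships.
--     k (int): The upper limit of integers to consider (from 1 to k).
--
--     Returns:
--     int: The number of distinct clans formed by the integers from 1 to k.
--     """
--
--     # List to hold the clan representation for each integer from 1 to k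
--     clan = []
--
--     # Iterate through each integer from 1 to k
--     for i in range(1, k + 1):
--         vec = []
--         # Check divisibility for each divisor
--         for j in range(len(divisors)):
--             if i % divisors[j] == 0:
--                 vec.append(1)  # Append 1 if i is divisible by the divisor
--             else:
--                 vec.append(0)  # Append 0 if i is not divisible by the divisor
--         clan.append(vec)  # Add the vector representation of the integer to the clan list
--
--     # Set to hold unique clans
--     clanSet = []
--
--     # Iterate through the clan representations to find unique clans
--     for i in range(len(clan)):
--         if clan[i] not in clanSet:
--             clanSet.append(clan[i])  # Add unique clan representation to the set
--
--     return len(clanSet)  # Return the number of unique clans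
-- ===== SOURCE B (Python) =====
-- def solution(divisors, k):
--     # sort the divisibility signatures, then count clans in one adjacent-comparison scan
--     sigs = sorted(
--         tuple(1 if i % d == 0 else 0 for d in divisors)
--         for i in range(1, k + 1)
--     )
--     count = 0
--     prev = None
--     for s in sigs:
--         if prev is None or s != prev:
--             count += 1
--         prev = s
--     return count
-- ===== Notes on version B (the rewrite author's own statement) =====
-- stated objective: alternative
-- what changed: A deduplicates signature vectors with a quadratic membership-scan over a growing list; B sorts the signatures and counts clans in a single adjacent-comparison scan over the sorted list.
import Mathlib
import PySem

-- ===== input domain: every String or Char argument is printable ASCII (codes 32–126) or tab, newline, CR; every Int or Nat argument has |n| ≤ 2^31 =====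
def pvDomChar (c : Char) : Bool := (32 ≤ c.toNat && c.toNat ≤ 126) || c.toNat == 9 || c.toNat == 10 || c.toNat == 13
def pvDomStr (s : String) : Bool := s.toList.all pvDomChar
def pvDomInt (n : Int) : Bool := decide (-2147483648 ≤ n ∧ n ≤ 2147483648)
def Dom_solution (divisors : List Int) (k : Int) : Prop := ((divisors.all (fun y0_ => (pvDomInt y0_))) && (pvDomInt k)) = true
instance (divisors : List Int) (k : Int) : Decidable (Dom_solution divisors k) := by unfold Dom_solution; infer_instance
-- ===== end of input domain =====

-- B counts clans by sorting the divisibility signatures and scanning adjacent pairs, instead of A's membership-scan deduplication (objective: alternative).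

-- ===== PORT A =====
def solution (divisors : List Int) (k : Int) : Int :=
  let clan := (PySem.List.pyRange 1 (k + 1) 1).foldl (fun clan i =>
    let vec := (PySem.List.pyRange 0 (divisors.length : Int) 1).foldl (fun vec j =>
      if PySem.Int.mod i (PySem.List.pyGetD divisors j 0) = 0 then vec ++ [(1 : Int)]
      else vec ++ [(0 : Int)]) []
    clan ++ [vec]) []
  let clanSet := (PySem.List.pyRange 0 (clan.length : Int) 1).foldl (fun cs i =>
    if PySem.List.pyGetD clan i [] ∈ cs then cs else cs ++ [PySem.List.pyGetD clan i []]) []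
  (clanSet.length : Int)

-- ===== PORT B =====
-- tuple(1 if i % d == 0 else 0 for d in divisors)
def sigRow (divisors : List Int) (i : Int) : List Int :=
  divisors.map (fun d => if PySem.Int.mod i d = 0 then (1 : Int) else 0)

-- the 'for s in sigs' scan with prev/count state
def scanB : List (List Int) → Option (List Int) → Int → Int
  | [], _, c => c
  | s :: t, prev, c => scanB t (some s) (if prev = some s then c else c + 1)

def solution_alt (divisors : List Int) (k : Int) : Int :=
  -- sorted(...) ported as Lean's stable merge sort under the lexicographic order (= Python's tuple order)
  let sigs := ((PySem.List.pyRange 1 (k + 1) 1).map (fun i => sigRow divisors i)).mergeSort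
      (fun a b => decide (a ≤ b))
  scanB sigs none 0

-- ===== PRECONDITION & SPEC =====
-- Pre_ excludes exactly the inputs on which Python A raises ZeroDivisionError: a 0 among the
-- divisors while the loop over 1..k actually runs (k ≥ 1).
def Pre_solution (divisors : List Int) (k : Int) : Prop := 1 ≤ k → (0 : Int) ∉ divisors
instance (divisors : List Int) (k : Int) : Decidable (Pre_solution divisors k) := by unfold Pre_solution; infer_instance
def pvWitness_solution : List Int × Int := ([2, 3], 10)

def Spec_solution (divisors : List Int) (k : Int) (out : Int) : Prop := out = solution_alt divisors k
instance (divisors : List Int) (k : Int) (out : Int) : Decidable (Spec_solution divisors k out) := by unfold Spec_solution; infer_instance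

-- ===== CLAIM (what is proved, stated in full; the proofs are below) =====
def Claim_equal_solution : Prop := ∀ (divisors : List Int) (k : Int), Dom_solution divisors k → Pre_solution divisors k → Spec_solution divisors k (solution divisors k)

-- ===== LEMMAS AND PROOFS =====

-- A's dedup loop, abstracted.
def uniqFold (acc l : List (List Int)) : List (List Int) :=
  l.foldl (fun cs c => if c ∈ cs then cs else cs ++ [c]) acc

theorem uniqFold_length (l : List (List Int)) : ∀ (acc : List (List Int)), acc.Nodup →
    (uniqFold acc l).length = (acc.toFinset ∪ l.toFinset).card := by
  induction l with
  | nil => intro acc h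
           simp [uniqFold, List.toFinset_card_of_nodup h]
  | cons x t ih =>
    intro acc h
    by_cases hx : x ∈ acc
    · have heq : (acc.toFinset ∪ (x :: t).toFinset) = acc.toFinset ∪ t.toFinset := by
        ext a; simp; aesop
      simp only [uniqFold, List.foldl_cons, if_pos hx]
      rw [uniqFold_eq, ih acc h, heq]
    · have hnd : (acc ++ [x]).Nodup := by
        rw [List.nodup_append]
        aesop
      simp only [uniqFold, List.foldl_cons, if_neg hx]
      rw [uniqFold_eq, ih _ hnd]
      congr 1
      ext a; simp
where
  uniqFold_eq (acc : List (List Int)) (l : List (List Int)) :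
      l.foldl (fun cs c => if c ∈ cs then cs else cs ++ [c]) acc = uniqFold acc l := rfl

-- A computes the number of distinct signature rows.
theorem solution_eq_card (divisors : List Int) (k : Int) :
    solution divisors k =
      (((PySem.List.pyRange 1 (k + 1) 1).map (fun i => sigRow divisors i)).toFinset.card : Int) := by
  unfold solution
  dsimp only
  have hinner : ∀ i : Int,
      (PySem.List.pyRange 0 (divisors.length : Int) 1).foldl (fun vec j =>
        if PySem.Int.mod i (PySem.List.pyGetD divisors j 0) = 0 then vec ++ [(1 : Int)]
        else vec ++ [(0 : Int)]) [] = sigRow divisors i := by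
    intro i
    have hfun : (fun (vec : List Int) (j : Int) =>
        if PySem.Int.mod i (PySem.List.pyGetD divisors j 0) = 0 then vec ++ [(1 : Int)]
        else vec ++ [(0 : Int)])
        = (fun vec j => vec ++ [if PySem.Int.mod i (PySem.List.pyGetD divisors j 0) = 0 then (1 : Int) else 0]) := by
      funext vec j; split <;> rfl
    rw [hfun,
      PySem.List.foldl_pyRange_zero_pyGetD' divisors 0
        (fun vec d => vec ++ [if PySem.Int.mod i d = 0 then (1 : Int) else 0]) [],
      PySem.List.foldl_append_singleton_eq_map]
    simp [sigRow]
  have houter : (PySem.List.pyRange 1 (k + 1) 1).foldl (fun clan i =>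
      clan ++ [(PySem.List.pyRange 0 (divisors.length : Int) 1).foldl (fun vec j =>
        if PySem.Int.mod i (PySem.List.pyGetD divisors j 0) = 0 then vec ++ [(1 : Int)]
        else vec ++ [(0 : Int)]) []]) []
      = (PySem.List.pyRange 1 (k + 1) 1).map (fun i => sigRow divisors i) := by
    rw [PySem.List.foldl_append_singleton_eq_map]
    simp only [List.nil_append]
    exact List.map_congr_left (fun i _ => hinner i)
  rw [houter]
  set V := (PySem.List.pyRange 1 (k + 1) 1).map (fun i => sigRow divisors i) with hV
  have hset : (PySem.List.pyRange 0 (V.length : Int) 1).foldl (fun cs i =>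
      if PySem.List.pyGetD V i [] ∈ cs then cs else cs ++ [PySem.List.pyGetD V i []]) []
      = uniqFold [] V := by
    exact PySem.List.foldl_pyRange_zero_pyGetD' V []
      (fun cs c => if c ∈ cs then cs else cs ++ [c]) []
  rw [hset, uniqFold_length V [] List.nodup_nil]
  simp

-- B's scan over a sorted (≤-pairwise) list counts the distinct elements after the seed.
theorem scanB_sorted : ∀ (t : List (List Int)) (x : List Int) (c : Int),
    (x :: t).Pairwise (· ≤ ·) → scanB t (some x) c = c + ((t.toFinset.erase x).card : Int) := by
  intro t
  induction t with
  | nil => intro x c _; simp [scanB]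
  | cons y t' ih =>
    intro x c hp
    have hxy : x ≤ y := (List.pairwise_cons.1 hp).1 y (by simp)
    have hp' : (y :: t').Pairwise (· ≤ ·) := (List.pairwise_cons.1 hp).2
    by_cases hne : y = x
    · subst hne
      have hstep : scanB (y :: t') (some y) c = scanB t' (some y) c := by
        show scanB t' (some y) (if some y = some y then c else c + 1) = _
        rw [if_pos rfl]
      rw [hstep, ih y c hp']
      have herase : (y :: t').toFinset.erase y = t'.toFinset.erase y := by
        ext a; simp [Finset.mem_erase]
      rw [herase]
    · have hstep : scanB (y :: t') (some x) c = scanB t' (some y) (c + 1) := by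
        show scanB t' (some y) (if some x = some y then c else c + 1) = _
        rw [if_neg (fun h => hne (Option.some.inj h).symm)]
      rw [hstep, ih y (c + 1) hp']
      have hxnot : x ∉ (y :: t').toFinset := by
        simp only [List.toFinset_cons, Finset.mem_insert, List.mem_toFinset]
        rintro (rfl | hxm)
        · exact hne rfl
        · exact hne (le_antisymm ((List.pairwise_cons.1 hp').1 x hxm) hxy)
      have herase : ((y :: t').toFinset.erase x) = (y :: t').toFinset :=
        Finset.erase_eq_of_notMem hxnot
      have hins : ((y :: t').toFinset).card = (t'.toFinset.erase y).card + 1 := by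
        have h1 : (y :: t').toFinset = insert y (t'.toFinset.erase y) := by
          ext a; simp [Finset.mem_erase]; tauto
        rw [h1, Finset.card_insert_of_notMem (Finset.notMem_erase y _)]
      rw [herase, hins]
      push_cast
      ring

theorem scanB_card (S : List (List Int)) (hp : S.Pairwise (· ≤ ·)) :
    scanB S none 0 = (S.toFinset.card : Int) := by
  cases S with
  | nil => simp [scanB]
  | cons h t =>
    have hstep : scanB (h :: t) none 0 = scanB t (some h) 1 := by simp [scanB]
    rw [hstep, scanB_sorted t h 1 hp]
    have h1 : (h :: t).toFinset = insert h (t.toFinset.erase h) := by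
      ext a; simp [Finset.mem_erase]; tauto
    rw [h1, Finset.card_insert_of_notMem (Finset.notMem_erase h _)]
    push_cast
    ring

-- pairwise order of B's merge sort
theorem sorted_pairwise_listInt (xs : List (List Int)) :
    (xs.mergeSort (fun a b => decide (a ≤ b))).Pairwise (fun a b => a ≤ b) := by
  have := List.pairwise_mergeSort (le := fun a b : List Int => decide (a ≤ b))
    (fun a b c => by simpa using le_trans) (fun a b => by simpa using le_total a b) xs
  simpa using this

-- ===== VERDICT (by name: the statement is the Claim_ definition above) =====
theorem solution_spec : Claim_equal_solution := by
  intro divisors k _ _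
  unfold Spec_solution
  rw [solution_eq_card]
  unfold solution_alt
  rw [scanB_card _ (sorted_pairwise_listInt _)]
  congr 2
  ext a
  simp [List.mem_mergeSort]
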